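-- pv_equiv track=rewrite | github.com/Matisse-Consortium/p2obp | p2obp/backend/parse.py | parse_file_section
-- ===== SOURCE A (Python) =====
-- from typing import Dict, List, Optional
--
-- def parse_file_section(lines: List, identifier: str) -> Dict:
--     """Parses the section of a file that corresponds to the given identifier
--     and returns a dict with the keys being the match to the identifier and
--     the values being a subset of the lines list.
--
--     Parameters
--     ----------
--     lines : list
--         The lines read from a file.
--     identifier : str
--         The identifier by which they should be split into subsets.
--
--     Returns
--     --------
--     subset : dict
--         A dict that contains a subsets of the original lines.
--     """
--     indices, labels = [], []
--     for index, line in enumerate(lines):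
--         if line.lower().startswith(identifier):
--             indices.append(index)
--             labels.append(line.strip())
--
--     if not indices:
--         indices, labels = [0], ["full_" + identifier]
--
--     sections = [lines[index:] if index == indices[~0] else
--                 lines[index:indices[i+1]] for i, index in enumerate(indices)]
--     return dict(zip(labels, sections))
-- ===== SOURCE B (Python) =====
-- def parse_file_section(lines, identifier):
--     """Single streaming pass: build the dict directly with a current label/bucket."""
--     subset = {}
--     label = None
--     bucket = None
--     for line in lines:
--         if line.lower().startswith(identifier):
--             if label is not None:
--                 subset[label] = bucket
--             label = line.strip()
--             bucket = [line]
--         elif bucket is not None: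
--             bucket.append(line)
--     if label is None:
--         return {"full_" + identifier: list(lines)}
--     subset[label] = bucket
--     return subset
-- ===== Notes on version B (the rewrite author's own statement) =====
-- stated objective: alternative
-- what changed: Replaced A's two-phase scheme (collect match indices and labels, then build each section by slicing the whole list between consecutive indices, then dict(zip(...))) with a single streaming pass that keeps a current label and bucket and writes each finished bucket into the dict directly.
import Mathlib
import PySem

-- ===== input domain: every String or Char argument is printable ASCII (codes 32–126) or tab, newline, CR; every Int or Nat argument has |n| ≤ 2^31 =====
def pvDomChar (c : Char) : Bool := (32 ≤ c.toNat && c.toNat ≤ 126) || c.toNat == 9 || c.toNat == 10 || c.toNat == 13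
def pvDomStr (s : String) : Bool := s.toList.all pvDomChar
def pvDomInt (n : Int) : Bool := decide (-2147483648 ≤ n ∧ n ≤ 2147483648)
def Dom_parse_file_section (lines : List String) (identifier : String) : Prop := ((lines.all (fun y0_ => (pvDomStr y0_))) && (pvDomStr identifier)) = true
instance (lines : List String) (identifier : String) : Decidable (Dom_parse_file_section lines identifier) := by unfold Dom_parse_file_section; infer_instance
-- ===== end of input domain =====

-- B replaces A's index-collection-plus-slicing pass with one streaming pass that builds
-- the dict directly (objective: alternative decomposition, same behaviour and cost class).

-- ===== PORT A =====
-- Literal port of A: collect (indices, labels) over enumerate(lines); fall back to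
-- ([0], ["full_" + identifier]) when no line matched; build sections by slicing lines
-- between consecutive indices (lines[index:] for the last one); dict(zip(labels, sections)).
-- 'indices[~0]' and 'indices[i+1]' are ported as pyGet? with .getD 0: both subscripts are
-- always in range where Python evaluates them (indices is nonempty, and i+1 is only read
-- when index is not the last element), so the default is never used.
def parse_file_section (lines : List String) (identifier : String) : List (String × List String) :=
  let il : List Int × List String :=
    (PySem.List.enumerate lines).foldl
      (fun acc p =>
        if PySem.Str.startswith (PySem.Str.lower p.2) identifier then
          (acc.1 ++ [p.1], acc.2 ++ [PySem.Str.strip p.2])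
        else acc)
      ([], [])
  let indices : List Int := if il.1.isEmpty then [0] else il.1
  let labels : List String := if il.1.isEmpty then ["full_" ++ identifier] else il.2
  let sections : List (List String) :=
    (PySem.List.enumerate indices).map
      (fun p =>
        if p.2 = (PySem.List.pyGet? indices (-1)).getD 0 then
          PySem.List.slice lines (some p.2) none
        else
          PySem.List.slice lines (some p.2) (some ((PySem.List.pyGet? indices (p.1 + 1)).getD 0)))
  ((labels.zip sections).foldl
      (fun d q => PySem.Dict.insert d q.1 q.2) (PySem.Dict.empty : PySem.Dict String (List String))).items

-- ===== PORT B =====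
-- Literal port of B (Source B): one fold over the lines keeping (dict so far, open (label, bucket)).
def parse_file_section_alt (lines : List String) (identifier : String) : List (String × List String) :=
  let st :=
    lines.foldl
      (fun (st : PySem.Dict String (List String) × Option (String × List String)) line =>
        if PySem.Str.startswith (PySem.Str.lower line) identifier then
          ((match st.2 with
            | some kb => st.1.insert kb.1 kb.2
            | none => st.1),
           some (PySem.Str.strip line, [line]))
        else
          match st.2 with
          | some kb => (st.1, some (kb.1, kb.2 ++ [line]))
          | none => st)
      ((PySem.Dict.empty : PySem.Dict String (List String)), none)
  match st.2 with
  | none => [("full_" ++ identifier, lines)]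
  | some kb => (st.1.insert kb.1 kb.2).items

-- ===== PRECONDITION & SPEC =====
def Spec_parse_file_section (lines : List String) (identifier : String) (out : List (String × List String)) : Prop := out = parse_file_section_alt lines identifier
instance (lines : List String) (identifier : String) (out : List (String × List String)) : Decidable (Spec_parse_file_section lines identifier out) := by unfold Spec_parse_file_section; infer_instance

-- ===== CLAIM (what is proved, stated in full; the proofs are below) =====
def Claim_equal_parse_file_section : Prop := ∀ (lines : List String) (identifier : String), Dom_parse_file_section lines identifier → Spec_parse_file_section lines identifier (parse_file_section lines identifier)

-- ===== LEMMAS AND PROOFS =====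

-- Indices (as Ints, relative to the head of the remaining list) of the matching lines.
def pvMidx (mm : String → Bool) : List String → List Int
  | [] => []
  | l :: ls => if mm l then 0 :: (pvMidx mm ls).map (· + 1) else (pvMidx mm ls).map (· + 1)

-- The (label, section) pairs both programs feed into the dict, in order.
def pvSegs (mm : String → Bool) : List String → List (String × List String)
  | [] => []
  | l :: ls =>
    if mm l then (PySem.Str.strip l, l :: ls.takeWhile (fun x => !mm x)) :: pvSegs mm ls
    else pvSegs mm ls

lemma pvMidx_nonneg (mm : String → Bool) (L : List String) : ∀ i ∈ pvMidx mm L, 0 ≤ i := by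
  induction L with
  | nil => simp [pvMidx]
  | cons l ls ih =>
    intro i hi
    simp only [pvMidx] at hi
    split at hi
    · rcases List.mem_cons.1 hi with h | h
      · omega
      · rcases List.mem_map.1 h with ⟨j, hj, rfl⟩; have := ih j hj; omega
    · rcases List.mem_map.1 hi with ⟨j, hj, rfl⟩; have := ih j hj; omega

lemma pvMidx_nil_iff (mm : String → Bool) (L : List String) :
    pvMidx mm L = [] ↔ L.any mm = false := by
  induction L with
  | nil => simp [pvMidx]
  | cons l ls ih =>
    simp only [pvMidx, List.any_cons]
    cases h : mm l <;> simp [ih]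

lemma pvMidx_head_takeWhile (mm : String → Bool) :
    ∀ (L : List String) (j : Int) (J : List Int), pvMidx mm L = j :: J →
      L.take j.toNat = L.takeWhile (fun x => !mm x) := by
  intro L
  induction L with
  | nil => intro j J h; simp [pvMidx] at h
  | cons l ls ih =>
    intro j J h
    simp only [pvMidx] at h
    by_cases hm : mm l
    · simp [hm] at h
      simp [h.1, hm]
    · simp only [if_neg hm] at h
      cases hJ : pvMidx mm ls with
      | nil => rw [hJ] at h; simp at h
      | cons j' J' =>
        rw [hJ] at h
        simp only [List.map_cons, List.cons.injEq] at h
        have hj' : 0 ≤ j' := pvMidx_nonneg mm ls j' (by rw [hJ]; exact List.mem_cons_self)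
        have : j.toNat = j'.toNat + 1 := by omega
        rw [this, List.take_succ_cons, List.takeWhile_cons]
        simp only [hm]
        rw [ih j' J' hJ]
        simp

-- A's first loop: foldl over enumerate collects the match indices (shifted by the start) and labels.
lemma pvEnumFold (mm : String → Bool) :
    ∀ (L : List String) (s : Int) (acc : List Int × List String),
      (PySem.List.enumerate L s).foldl
        (fun acc p => if mm p.2 then (acc.1 ++ [p.1], acc.2 ++ [PySem.Str.strip p.2]) else acc) acc
      = (acc.1 ++ (pvMidx mm L).map (· + s), acc.2 ++ (L.filter mm).map PySem.Str.strip) := by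
  intro L
  induction L with
  | nil => intro s acc; simp [PySem.List.enumerate_nil, pvMidx]
  | cons l ls ih =>
    intro s acc
    rw [PySem.List.enumerate_cons, List.foldl_cons]
    by_cases hm : mm l
    · simp only [hm, if_pos]
      rw [ih (s + 1)]
      simp [pvMidx, hm, List.map_map]
      intro a _; omega
    · simp only [hm, if_neg, Bool.false_eq_true, not_false_iff]
      rw [ih (s + 1)]
      simp [pvMidx, hm, List.map_map]
      intro a _; omega

lemma pvPyGet?_map (f : Int → Int) (xs : List Int) (n : Int) :
    PySem.List.pyGet? (xs.map f) n = (PySem.List.pyGet? xs n).map f := by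
  simp [PySem.List.pyGet?]

lemma pvEnumerate_map {α β : Type} (f : α → β) (xs : List α) (s : Int) :
    PySem.List.enumerate (xs.map f) s = (PySem.List.enumerate xs s).map (fun p => (p.1, f p.2)) := by
  induction xs generalizing s with
  | nil => simp [PySem.List.enumerate_nil]
  | cons x xs ih => simp [PySem.List.enumerate_cons, ih]

lemma pvEnumerate_shift {α : Type} (xs : List α) (s : Int) :
    PySem.List.enumerate xs (s + 1) = (PySem.List.enumerate xs s).map (fun p => (p.1 + 1, p.2)) := by
  induction xs generalizing s with
  | nil => simp [PySem.List.enumerate_nil]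
  | cons x xs ih => simp [PySem.List.enumerate_cons, ih]

lemma pvMem_enumerate {α : Type} :
    ∀ (xs : List α) (s : Int) (p : Int × α), p ∈ PySem.List.enumerate xs s → s ≤ p.1 ∧ p.2 ∈ xs := by
  intro xs
  induction xs with
  | nil => intro s p h; simp [PySem.List.enumerate_nil] at h
  | cons x xs ih =>
    intro s p h
    rw [PySem.List.enumerate_cons] at h
    rcases List.mem_cons.1 h with h | h
    · subst h; simp
    · have := ih (s + 1) p h
      exact ⟨by omega, List.mem_cons_of_mem _ this.2⟩

-- shift lemmas for slices
lemma pvSlice_shift_from (L : List String) (l : String) (i : Int) (hi : 0 ≤ i) :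
    PySem.List.slice (l :: L) (some (i + 1)) none = PySem.List.slice L (some i) none := by
  rw [PySem.List.slice_from _ (by omega), PySem.List.slice_from _ hi]
  have : (i + 1).toNat = i.toNat + 1 := by omega
  rw [this, List.drop_succ_cons]

lemma pvSlice_shift (L : List String) (l : String) (i v : Int) (hi : 0 ≤ i) (hv : 0 ≤ v) :
    PySem.List.slice (l :: L) (some (i + 1)) (some (v + 1)) = PySem.List.slice L (some i) (some v) := by
  rw [PySem.List.slice_toNat _ (by omega) (by omega), PySem.List.slice_toNat _ hi hv]
  have h1 : (i + 1).toNat = i.toNat + 1 := by omega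
  rw [h1, List.drop_succ_cons]
  congr 1
  omega

lemma pvSlice_shift_zero (L : List String) (l : String) (i : Int) (hi : 0 ≤ i) :
    PySem.List.slice (l :: L) (some (i + 1)) (some 0) = PySem.List.slice L (some i) (some 0) := by
  rw [PySem.List.slice_toNat _ (by omega) (by omega), PySem.List.slice_toNat _ hi (by omega)]
  simp

-- the section built for a non-head position shifts down by one line / one index
lemma pvSec_shift (mm : String → Bool) (L : List String) (l : String)
    (W : List Int) (hW : pvMidx mm L = W) (k i : Int) (hk : 0 ≤ k) (hki : (k, i) ∈ PySem.List.enumerate W 0) :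
    (if i + 1 = (PySem.List.pyGet? (W.map (· + 1)) (-1)).getD 0 then
        PySem.List.slice (l :: L) (some (i + 1)) none
      else
        PySem.List.slice (l :: L) (some (i + 1))
          (some ((PySem.List.pyGet? (W.map (· + 1)) (k + 1)).getD 0)))
    = (if i = (PySem.List.pyGet? W (-1)).getD 0 then
        PySem.List.slice L (some i) none
      else
        PySem.List.slice L (some i) (some ((PySem.List.pyGet? W (k + 1)).getD 0))) := by
  have hiW : i ∈ W := (pvMem_enumerate W 0 (k, i) hki).2
  have hi : 0 ≤ i := by subst hW; exact pvMidx_nonneg mm L i hiW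
  have hWne : W ≠ [] := by intro h; rw [h] at hiW; simp at hiW
  obtain ⟨x, hx⟩ := Option.isSome_iff_exists.1 (List.getLast?_isSome.2 hWne)
  have hlast : (PySem.List.pyGet? (W.map (· + 1)) (-1)).getD 0 = x + 1 := by
    rw [PySem.List.pyGet?_neg_one, List.getLast?_map, hx]; rfl
  have hlast' : (PySem.List.pyGet? W (-1)).getD 0 = x := by
    rw [PySem.List.pyGet?_neg_one, hx]; rfl
  rw [hlast, hlast']
  by_cases hix : i = x
  · rw [if_pos (by omega), if_pos hix, pvSlice_shift_from L l i hi]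
  · rw [if_neg (by omega), if_neg hix]
    obtain ⟨kn, rfl⟩ : ∃ kn : Nat, k = (kn : Int) := ⟨k.toNat, by omega⟩
    rw [pvPyGet?_map]
    cases hv : PySem.List.pyGet? W ((kn : Int) + 1) with
    | none => simp only [Option.map_none, Option.getD_none]
              exact pvSlice_shift_zero L l i hi
    | some v =>
      have hv0 : 0 ≤ v := by
        subst hW
        exact pvMidx_nonneg mm L v (PySem.List.mem_of_pyGet?_eq_some _ hv)
      simp only [Option.map_some, Option.getD_some]
      exact pvSlice_shift L l i v hi hv0

-- MAIN A-side lemma: labels zipped with sections is exactly pvSegs.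
lemma pvZipSegs (mm : String → Bool) :
    ∀ L : List String,
      ((L.filter mm).map PySem.Str.strip).zip
        ((PySem.List.enumerate (pvMidx mm L)).map
          (fun p =>
            if p.2 = (PySem.List.pyGet? (pvMidx mm L) (-1)).getD 0 then
              PySem.List.slice L (some p.2) none
            else
              PySem.List.slice L (some p.2)
                (some ((PySem.List.pyGet? (pvMidx mm L) (p.1 + 1)).getD 0))))
      = pvSegs mm L := by
  intro L
  induction L with
  | nil => simp [pvMidx, pvSegs, PySem.List.enumerate_nil]
  | cons l ls ih =>
    by_cases hm : mm l
    · -- head line matches: indices are 0 :: shifted indices of ls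
      have e1 : pvMidx mm (l :: ls) = 0 :: (pvMidx mm ls).map (· + 1) := by simp [pvMidx, hm]
      have e2 : pvSegs mm (l :: ls)
          = (PySem.Str.strip l, l :: ls.takeWhile (fun x => !mm x)) :: pvSegs mm ls := by
        simp [pvSegs, hm]
      have e3 : (l :: ls).filter mm = l :: ls.filter mm := by simp [hm]
      rw [e1, e2, e3, List.map_cons]
      rw [PySem.List.enumerate_cons, List.map_cons, List.zip_cons_cons]
      congr 1
      · -- head pair: section for index 0
        congr 1
        cases hJ : pvMidx mm ls with
        | nil =>
          simp only [List.map_nil, PySem.List.pyGet?_neg_one]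
          rw [if_pos (by simp)]
          rw [PySem.List.slice_from _ (by omega)]
          simp only [Int.toNat_zero, List.drop_zero]
          have : ls.takeWhile (fun x => !mm x) = ls := by
            rw [List.takeWhile_eq_self_iff]
            intro x hx
            have := (pvMidx_nil_iff mm ls).1 hJ
            simp only [List.any_eq_false] at this
            simp [this x hx]
          rw [this]
        | cons j J =>
          have hj : 0 ≤ j := pvMidx_nonneg mm ls j (by rw [hJ]; exact List.mem_cons_self)
          simp only [List.map_cons, PySem.List.pyGet?_neg_one]
          rw [if_neg ?_]
          swap
          · obtain ⟨x, hx⟩ := Option.isSome_iff_exists.1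
              (List.getLast?_isSome.2 (List.cons_ne_nil (j + 1) (J.map (· + 1))))
            have hxmem : x ∈ (j + 1) :: J.map (· + 1) := List.mem_of_getLast? hx
            have hx0 : 0 < x := by
              rcases List.mem_cons.1 hxmem with h | h
              · omega
              · rcases List.mem_map.1 h with ⟨y, hy, rfl⟩
                have : 0 ≤ y := pvMidx_nonneg mm ls y (by rw [hJ]; exact List.mem_cons_of_mem _ hy)
                omega
            rw [List.getLast?_cons_cons, hx]
            simp only [Option.getD_some]
            omega
          · have : PySem.List.pyGet? ((0 : Int) :: (j + 1) :: J.map (· + 1)) ((0 : Int) + 1)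
                = some (j + 1) := by
              have h01 : (0 : Int) + 1 = ((0 : Nat) : Int) + 1 := by norm_num
              rw [h01, PySem.List.pyGet?_cons_succ]
              exact PySem.List.pyGet?_zero_cons (j + 1) (J.map (· + 1))
            rw [this]
            simp only [Option.getD_some]
            rw [PySem.List.slice_toNat _ (by omega) (by omega)]
            simp only [Int.toNat_zero, List.drop_zero, Nat.sub_zero]
            have : (j + 1).toNat = j.toNat + 1 := by omega
            rw [this, List.take_succ_cons]
            rw [pvMidx_head_takeWhile mm ls j J hJ]
      · -- tail: shift down to ls and apply the IH
        rw [pvEnumerate_map, pvEnumerate_shift, List.map_map, List.map_map]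
        rw [← ih]
        congr 1
        apply List.map_congr_left
        intro p hp
        obtain ⟨k, i⟩ := p
        have hk : 0 ≤ k := (pvMem_enumerate _ 0 (k, i) hp).1
        simp only [Function.comp]
        have hcs : ∀ (w : List Int) (n : Int), 0 ≤ n →
            PySem.List.pyGet? ((0 : Int) :: w) (n + 1) = PySem.List.pyGet? w n := by
          intro w n hn
          obtain ⟨m, rfl⟩ : ∃ m : Nat, n = (m : Int) := ⟨n.toNat, by omega⟩
          exact PySem.List.pyGet?_cons_succ 0 w m
        have hne : pvMidx mm ls ≠ [] := by
          intro h
          rw [h] at hp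
          simp [PySem.List.enumerate_nil] at hp
        have hlast0 : PySem.List.pyGet? ((0 : Int) :: (pvMidx mm ls).map (· + 1)) (-1)
            = PySem.List.pyGet? ((pvMidx mm ls).map (· + 1)) (-1) := by
          rw [PySem.List.pyGet?_neg_one, PySem.List.pyGet?_neg_one]
          rcases List.exists_cons_of_ne_nil hne with ⟨a, as, has⟩
          rw [has]
          simp [List.getLast?_cons_cons]
        simp only [hlast0, hcs _ (k + 1) (by omega)]
        exact pvSec_shift mm ls l (pvMidx mm ls) rfl k i hk hp
    · -- head line does not match: everything shifts down by one
      have e1 : pvMidx mm (l :: ls) = (pvMidx mm ls).map (· + 1) := by simp [pvMidx, hm]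
      have e2 : pvSegs mm (l :: ls) = pvSegs mm ls := by simp [pvSegs, hm]
      have e3 : (l :: ls).filter mm = ls.filter mm := by simp [hm]
      rw [e1, e2, e3]
      rw [pvEnumerate_map, List.map_map]
      rw [← ih]
      congr 1
      apply List.map_congr_left
      intro p hp
      obtain ⟨k, i⟩ := p
      have hk : 0 ≤ k := (pvMem_enumerate _ 0 (k, i) hp).1
      simp only [Function.comp]
      exact pvSec_shift mm ls l (pvMidx mm ls) rfl k i hk hp

-- ==== B side ====

-- B's loop once a bucket is open: it finishes as the fold of the remaining segments.
lemma pvBFold_some (identifier : String) :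
    ∀ (ls : List String) (d : PySem.Dict String (List String)) (k : String) (b : List String),
      (match (ls.foldl
          (fun (st : PySem.Dict String (List String) × Option (String × List String)) line =>
            if PySem.Str.startswith (PySem.Str.lower line) identifier then
              ((match st.2 with
                | some kb => st.1.insert kb.1 kb.2
                | none => st.1),
               some (PySem.Str.strip line, [line]))
            else
              match st.2 with
              | some kb => (st.1, some (kb.1, kb.2 ++ [line]))
              | none => st)
          (d, some (k, b))).2 with
        | some kb => some ((ls.foldl
          (fun (st : PySem.Dict String (List String) × Option (String × List String)) line =>
            if PySem.Str.startswith (PySem.Str.lower line) identifier then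
              ((match st.2 with
                | some kb => st.1.insert kb.1 kb.2
                | none => st.1),
               some (PySem.Str.strip line, [line]))
            else
              match st.2 with
              | some kb => (st.1, some (kb.1, kb.2 ++ [line]))
              | none => st)
          (d, some (k, b))).1.insert kb.1 kb.2)
        | none => none)
      = some (((k, b ++ ls.takeWhile (fun x => !(PySem.Str.startswith (PySem.Str.lower x) identifier))) :: pvSegs (fun x => PySem.Str.startswith (PySem.Str.lower x) identifier) ls).foldl
          (fun d q => PySem.Dict.insert d q.1 q.2) d) := by
  intro ls
  induction ls with
  | nil => intro d k b; simp [pvSegs]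
  | cons l ls ih =>
    intro d k b
    by_cases hm : PySem.Str.startswith (PySem.Str.lower l) identifier
    · have hmc : PySem.Chars.startswith (PySem.Chars.lower l.toList) identifier.toList = true := by
        simpa using hm
      simp only [List.foldl_cons, if_pos hm]
      rw [ih (d.insert k b) (PySem.Str.strip l) [l]]
      simp [pvSegs, hmc]
    · have hmc : PySem.Chars.startswith (PySem.Chars.lower l.toList) identifier.toList = false := by
        simpa using hm
      simp only [List.foldl_cons, if_neg hm]
      rw [ih d k (b ++ [l])]
      simp [pvSegs, hmc, List.append_assoc]

-- B's loop before any bucket is open.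
lemma pvBFold_none (identifier : String) :
    ∀ (ls : List String) (d : PySem.Dict String (List String)),
      (match (ls.foldl
          (fun (st : PySem.Dict String (List String) × Option (String × List String)) line =>
            if PySem.Str.startswith (PySem.Str.lower line) identifier then
              ((match st.2 with
                | some kb => st.1.insert kb.1 kb.2
                | none => st.1),
               some (PySem.Str.strip line, [line]))
            else
              match st.2 with
              | some kb => (st.1, some (kb.1, kb.2 ++ [line]))
              | none => st)
          (d, none)).2 with
        | some kb => some ((ls.foldl
          (fun (st : PySem.Dict String (List String) × Option (String × List String)) line =>
            if PySem.Str.startswith (PySem.Str.lower line) identifier then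
              ((match st.2 with
                | some kb => st.1.insert kb.1 kb.2
                | none => st.1),
               some (PySem.Str.strip line, [line]))
            else
              match st.2 with
              | some kb => (st.1, some (kb.1, kb.2 ++ [line]))
              | none => st)
          (d, none)).1.insert kb.1 kb.2)
        | none => none)
      = (if ls.any (fun x => PySem.Str.startswith (PySem.Str.lower x) identifier) then
          some ((pvSegs (fun x => PySem.Str.startswith (PySem.Str.lower x) identifier) ls).foldl
            (fun d q => PySem.Dict.insert d q.1 q.2) d)
        else none) := by
  intro ls
  induction ls with
  | nil => intro d; simp
  | cons l ls ih =>
    intro d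
    by_cases hm : PySem.Str.startswith (PySem.Str.lower l) identifier
    · have hmc : PySem.Chars.startswith (PySem.Chars.lower l.toList) identifier.toList = true := by
        simpa using hm
      simp only [List.foldl_cons, if_pos hm]
      rw [pvBFold_some identifier ls d (PySem.Str.strip l) [l]]
      simp [pvSegs, hmc, List.any_cons]
    · have hmc : PySem.Chars.startswith (PySem.Chars.lower l.toList) identifier.toList = false := by
        simpa using hm
      simp only [List.foldl_cons, if_neg hm]
      rw [ih d]
      simp [pvSegs, hmc, List.any_cons]

-- main equivalence
lemma pvAB_eq (lines : List String) (identifier : String) :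
    parse_file_section lines identifier = parse_file_section_alt lines identifier := by
  unfold parse_file_section parse_file_section_alt
  rw [pvEnumFold (fun x => PySem.Str.startswith (PySem.Str.lower x) identifier) lines 0 ([], [])]
  simp only [List.nil_append]
  have hmap0 : (pvMidx (fun x => PySem.Str.startswith (PySem.Str.lower x) identifier) lines).map (· + (0 : Int))
      = pvMidx (fun x => PySem.Str.startswith (PySem.Str.lower x) identifier) lines := by
    simp
  rw [hmap0]
  by_cases hany : lines.any (fun x => PySem.Str.startswith (PySem.Str.lower x) identifier)
  · -- some line matches
    have hne : pvMidx (fun x => PySem.Str.startswith (PySem.Str.lower x) identifier) lines ≠ [] := by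
      intro h
      rw [pvMidx_nil_iff] at h
      rw [h] at hany
      simp at hany
    have hie : (pvMidx (fun x => PySem.Str.startswith (PySem.Str.lower x) identifier) lines).isEmpty = false := by
      exact List.isEmpty_eq_false_iff.mpr hne
    simp only [hie, Bool.false_eq_true, if_false]
    -- rewrite B's match using pvBFold_none
    have hB := pvBFold_none identifier lines PySem.Dict.empty
    rw [if_pos hany] at hB
    -- case on the final option state
    split
    next hst => rw [hst] at hB; simp at hB
    next kb hst =>
      rw [hst] at hB
      simp only [Option.some.injEq] at hB
      rw [hB]
      congr 1
      exact congrArg (List.foldl _ _)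
        (pvZipSegs (fun x => PySem.Str.startswith (PySem.Str.lower x) identifier) lines)
  · -- no line matches: fallback on both sides
    have hnil : pvMidx (fun x => PySem.Str.startswith (PySem.Str.lower x) identifier) lines = [] := by
      rw [pvMidx_nil_iff]
      simpa using hany
    have hB := pvBFold_none identifier lines PySem.Dict.empty
    rw [if_neg hany] at hB
    rw [hnil]
    simp only [List.isEmpty_nil, reduceIte]
    split
    next hst =>
      rw [PySem.List.enumerate_cons]
      simp only [PySem.List.enumerate_nil, List.map_cons, List.map_nil, PySem.List.pyGet?_neg_one]
      simp only [List.getLast?_singleton, Option.getD_some]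
      rw [PySem.List.slice_from _ (by omega)]
      simp only [Int.toNat_zero, List.drop_zero]
      rw [List.zip_cons_cons, List.zip_nil_right]
      simp only [List.foldl_cons, List.foldl_nil]
      rw [PySem.Dict.items_insert_of_not_contains _ _ (PySem.Dict.contains_empty _)]
      simp [PySem.Dict.empty]
    next kb hst => rw [hst] at hB; simp at hB

-- ===== VERDICT (by name: the statement is the Claim_ definition above) =====
theorem parse_file_section_spec : Claim_equal_parse_file_section := by
  intro lines identifier _
  unfold Spec_parse_file_section
  exact pvAB_eq lines identifier
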